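-- pv_equiv track=rewrite | github.com/DataXpertEngineer/dsa-using-python | dynamic_programming/classic_problems/lcs.py | lcs_recursive
-- ===== SOURCE A (Python) =====
-- def lcs_recursive(s1: str, s2: str, m: int = None, n: int = None) -> int:
--     """
--     LCS using pure recursion.
--
--     Args:
--         s1 (str): First string
--         s2 (str): Second string
--         m (int): Length of s1
--         n (int): Length of s2
--
--     Returns:
--         int: LCS length
--
--     Complexity:
--         Time: O(2^(m+n))  - Exponential.
--         Space: O(m + n)   - Recursion stack.
--     """
--     if m is None:
--         m = len(s1)
--     if n is None:
--         n = len(s2)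
--
--     if m == 0 or n == 0:
--         return 0
--
--     if s1[m - 1] == s2[n - 1]:
--         return 1 + lcs_recursive(s1, s2, m - 1, n - 1)
--     else:
--         return max(
--             lcs_recursive(s1, s2, m - 1, n),
--             lcs_recursive(s1, s2, m, n - 1)
--         )
-- ===== SOURCE B (Python) =====
-- def lcs_recursive(s1: str, s2: str, m: int = None, n: int = None) -> int:
--     if m is None:
--         m = len(s1)
--     if n is None:
--         n = len(s2)
--     a, b = s1[:m], s2[:n]
--     prev = [0] * (len(b) + 1)
--     for ca in a:
--         cur = [0]
--         left = 0
--         for j, cb in enumerate(b):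
--             left = prev[j] + 1 if ca == cb else max(prev[j + 1], left)
--             cur.append(left)
--         prev = cur
--     return prev[-1]
-- ===== Notes on version B (the rewrite author's own statement) =====
-- stated objective: alternative
-- what changed: Replaced the pure recursion over (m,n) with a bottom-up single-row dynamic program over (i,j) prefix subproblems.
-- outside the precondition, e.g. on lcs_recursive('ba', 'b', -1, 1): A returns 1, B returns 1; on lcs_recursive('a', 'b', 5, 1): A raises IndexError, B returns 0
import Mathlib
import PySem

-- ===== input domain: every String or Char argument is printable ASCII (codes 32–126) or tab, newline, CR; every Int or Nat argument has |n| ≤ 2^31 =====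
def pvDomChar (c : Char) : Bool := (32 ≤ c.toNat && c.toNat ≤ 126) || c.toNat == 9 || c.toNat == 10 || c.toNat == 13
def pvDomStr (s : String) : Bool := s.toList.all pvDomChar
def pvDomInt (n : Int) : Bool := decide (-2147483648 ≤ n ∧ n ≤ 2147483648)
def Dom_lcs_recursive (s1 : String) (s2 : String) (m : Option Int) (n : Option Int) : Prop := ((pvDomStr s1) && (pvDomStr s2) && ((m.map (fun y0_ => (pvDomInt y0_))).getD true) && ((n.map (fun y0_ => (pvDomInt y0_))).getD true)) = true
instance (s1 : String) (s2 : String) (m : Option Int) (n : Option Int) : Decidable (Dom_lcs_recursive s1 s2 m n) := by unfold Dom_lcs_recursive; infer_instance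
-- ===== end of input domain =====

-- B replaces A's pure recursion over (m,n) by a bottom-up one-row dynamic program over (i,j)
-- prefix subproblems (objective: alternative algorithm, same return value).

-- ===== PORT A =====
-- Fuel makes the recursion total; inside Pre_ the fuel (m.toNat + n.toNat + 1) is never exhausted,
-- and the `| _, _ => 0` arm is Python's IndexError (excluded by Pre_).
def lcsA_go (fuel : Nat) (l1 l2 : List Char) (m n : Int) : Int :=
  match fuel with
  | 0 => 0
  | fuel + 1 =>
    if m = 0 ∨ n = 0 then 0
    else
      match PySem.List.pyGet? l1 (m - 1), PySem.List.pyGet? l2 (n - 1) with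
      | some c1, some c2 =>
        if c1 = c2 then 1 + lcsA_go fuel l1 l2 (m - 1) (n - 1)
        else max (lcsA_go fuel l1 l2 (m - 1) n) (lcsA_go fuel l1 l2 m (n - 1))
      | _, _ => 0

def lcs_recursive (s1 : String) (s2 : String) (m : Option Int) (n : Option Int) : Int :=
  let l1 := s1.toList
  let l2 := s2.toList
  let m0 := m.getD (l1.length : Int)
  let n0 := n.getD (l2.length : Int)
  lcsA_go (m0.toNat + n0.toNat + 1) l1 l2 m0 n0

-- ===== PORT B =====
-- inner `for j, cb in enumerate(b)` loop of Source B: consumes b and prev together, carrying `left`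
def lcsB_row (ca : Char) : List Char → List Int → Int → List Int
  | cb :: bs, p0 :: rest, left =>
    let v := if ca = cb then p0 + 1 else max (rest.headD 0) left
    v :: lcsB_row ca bs rest v
  | _, _, _ => []

def lcs_recursive_alt (s1 : String) (s2 : String) (m : Option Int) (n : Option Int) : Int :=
  let m0 := m.getD (s1.toList.length : Int)
  let n0 := n.getD (s2.toList.length : Int)
  let a := PySem.List.slice s1.toList none (some m0)
  let b := PySem.List.slice s2.toList none (some n0)
  let prev0 : List Int := List.replicate (b.length + 1) 0
  let final := a.foldl (fun prev ca => 0 :: lcsB_row ca b prev 0) prev0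
  (PySem.List.pyGet? final (-1)).getD 0

-- ===== PRECONDITION & SPEC =====
-- Pre_ restricts explicit m/n to the natural domain [0, len] of the documented "length" parameters
-- (plus the m=0 / n=0 short-circuit, on which A answers 0 for any other argument): outside it A
-- raises IndexError on almost every input, and the few values it still returns come from Python's
-- negative-index wraparound, an accident outside the function's natural domain.
def Pre_lcs_recursive (s1 : String) (s2 : String) (m : Option Int) (n : Option Int) : Prop :=
  let m0 := m.getD (s1.toList.length : Int)
  let n0 := n.getD (s2.toList.length : Int)
  m0 = 0 ∨ n0 = 0 ∨ (0 ≤ m0 ∧ m0 ≤ (s1.toList.length : Int) ∧ 0 ≤ n0 ∧ n0 ≤ (s2.toList.length : Int))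
instance (s1 : String) (s2 : String) (m : Option Int) (n : Option Int) : Decidable (Pre_lcs_recursive s1 s2 m n) := by unfold Pre_lcs_recursive; infer_instance

def pvWitness_lcs_recursive : String × String × Option Int × Option Int := ("abcb", "bdcab", none, none)

def Spec_lcs_recursive (s1 : String) (s2 : String) (m : Option Int) (n : Option Int) (out : Int) : Prop := out = lcs_recursive_alt s1 s2 m n
instance (s1 : String) (s2 : String) (m : Option Int) (n : Option Int) (out : Int) : Decidable (Spec_lcs_recursive s1 s2 m n out) := by unfold Spec_lcs_recursive; infer_instance

-- ===== CLAIM (what is proved, stated in full; the proofs are below) =====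
def Claim_equal_lcs_recursive : Prop := ∀ (s1 : String) (s2 : String) (m : Option Int) (n : Option Int), Dom_lcs_recursive s1 s2 m n → Pre_lcs_recursive s1 s2 m n → Spec_lcs_recursive s1 s2 m n (lcs_recursive s1 s2 m n)

-- ===== LEMMAS AND PROOFS =====

-- the mathematical LCS table: lcsD a b i j = LCS length of a.take i and b.take j
def lcsD (a b : List Char) : Nat → Nat → Int
  | 0, _ => 0
  | _ + 1, 0 => 0
  | i + 1, j + 1 =>
    if a.getD i ' ' = b.getD j ' ' then lcsD a b i j + 1
    else max (lcsD a b i (j + 1)) (lcsD a b (i + 1) j)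
termination_by i j => i + j

theorem lcsA_go_eq (l1 l2 : List Char) :
    ∀ (fuel i j : Nat), i ≤ l1.length → j ≤ l2.length → i + j < fuel →
      lcsA_go fuel l1 l2 (i : Int) (j : Int) = lcsD l1 l2 i j := by
  intro fuel
  induction fuel with
  | zero => intro i j _ _ h; omega
  | succ fuel ih =>
    intro i j hi hj hf
    match i, j with
    | 0, j => simp [lcsA_go, lcsD]
    | i + 1, 0 => simp [lcsA_go, lcsD]
    | i + 1, j + 1 =>
      have hcond : ¬ (((i + 1 : Nat) : Int) = 0 ∨ ((j + 1 : Nat) : Int) = 0) := by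
        push_cast; omega
      have hi' : i < l1.length := by omega
      have hj' : j < l2.length := by omega
      have e1 : ((i + 1 : Nat) : Int) - 1 = (i : Int) := by push_cast; omega
      have e2 : ((j + 1 : Nat) : Int) - 1 = (j : Int) := by push_cast; omega
      have g1 : PySem.List.pyGet? l1 (((i + 1 : Nat) : Int) - 1) = some l1[i] := by
        rw [e1, PySem.List.pyGet?_natCast]; simp [hi']
      have g2 : PySem.List.pyGet? l2 (((j + 1 : Nat) : Int) - 1) = some l2[j] := by
        rw [e2, PySem.List.pyGet?_natCast]; simp [hj']
      rw [lcsA_go]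
      rw [if_neg hcond, g1, g2]
      dsimp only
      have d1 : l1.getD i ' ' = l1[i] := by simp [List.getD, hi']
      have d2 : l2.getD j ' ' = l2[j] := by simp [List.getD, hj']
      rw [lcsD, d1, d2]
      by_cases hc : l1[i] = l2[j]
      · rw [if_pos hc, if_pos hc, e1, e2, ih i j (by omega) (by omega) (by omega)]; ring
      · rw [if_neg hc, if_neg hc, e1, e2,
          ih i (j + 1) (by omega) (by omega) (by omega),
          ih (i + 1) j (by omega) (by omega) (by omega)]

theorem lcsB_row_spec (a b : List Char) (i : Nat) :
    ∀ (bs : List Char) (j : Nat), bs = b.drop j →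
      lcsB_row (a.getD i ' ') bs ((List.range' j (b.length + 1 - j)).map (lcsD a b i)) (lcsD a b (i + 1) j)
        = (List.range' (j + 1) (b.length - j)).map (lcsD a b (i + 1)) := by
  intro bs
  induction bs generalizing i with
  | nil =>
    intro j h
    have hl : b.length ≤ j := by
      have := List.drop_eq_nil_iff.mp h.symm; omega
    have h0 : b.length - j = 0 := by omega
    rw [h0]
    rcases Nat.eq_or_lt_of_le hl with h1 | h1
    · have : b.length + 1 - j = 1 := by omega
      rw [this]; simp [lcsB_row]
    · have : b.length + 1 - j = 0 := by omega
      rw [this]; simp [lcsB_row]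
  | cons cb bs' ih =>
    intro j h
    have hj : j < b.length := by
      by_contra hc
      have : b.drop j = [] := List.drop_eq_nil_iff.mpr (by omega)
      rw [this] at h; exact List.cons_ne_nil _ _ h
    have hcb : cb = b[j] := by
      have h0 : (b.drop j)[0]? = some cb := by rw [← h]; rfl
      rw [List.getElem?_drop] at h0
      simp [List.getElem?_eq_getElem hj] at h0
      exact h0.symm
    have hbs' : bs' = b.drop (j + 1) := by
      have ht : (b.drop j).tail = b.drop (j + 1) := by rw [List.tail_drop]
      rw [← ht, ← h]; rfl
    have e1 : b.length + 1 - j = (b.length - (j + 1)) + 2 := by omega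
    have e2 : b.length - j = (b.length - (j + 1)) + 1 := by omega
    set k := b.length - (j + 1) with hk
    rw [e1, e2, List.range'_succ, List.map_cons, List.range'_succ, List.map_cons]
    have hdb : b.getD j ' ' = cb := by simp [List.getD, List.getElem?_eq_getElem hj, hcb]
    have hv : (if a.getD i ' ' = cb then lcsD a b i j + 1
        else max (lcsD a b i (j + 1)) (lcsD a b (i + 1) j))
        = lcsD a b (i + 1) (j + 1) := by
      conv_rhs => rw [lcsD]
      rw [hdb]
    simp only [lcsB_row, List.headD_cons]
    rw [hv]
    congr 1
    have hrest : (lcsD a b i (j + 1) :: List.map (lcsD a b i) (List.range' (j + 1 + 1) k))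
        = List.map (lcsD a b i) (List.range' (j + 1) (b.length + 1 - (j + 1))) := by
      rw [show b.length + 1 - (j + 1) = k + 1 by omega, List.range'_succ, List.map_cons]
    rw [hrest, ih (i := i) (j + 1) hbs']

theorem lcsB_fold (a b : List Char) :
    ∀ (as_ : List Char) (i : Nat), as_ = a.drop i → i ≤ a.length →
      as_.foldl (fun prev ca => 0 :: lcsB_row ca b prev 0)
        ((List.range' 0 (b.length + 1)).map (lcsD a b i))
      = (List.range' 0 (b.length + 1)).map (lcsD a b a.length) := by
  intro as_
  induction as_ with
  | nil =>
    intro i h hi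
    have : a.length ≤ i := by
      have := List.drop_eq_nil_iff.mp h.symm; omega
    have : i = a.length := by omega
    rw [this, List.foldl_nil]
  | cons ca as' ih =>
    intro i h hi
    have hj : i < a.length := by
      by_contra hc
      have : a.drop i = [] := List.drop_eq_nil_iff.mpr (by omega)
      rw [this] at h; exact List.cons_ne_nil _ _ h
    have hca : ca = a.getD i ' ' := by
      have h0 : (a.drop i)[0]? = some ca := by rw [← h]; rfl
      rw [List.getElem?_drop] at h0
      simp [List.getElem?_eq_getElem hj] at h0
      simp [List.getD, List.getElem?_eq_getElem hj, h0]
    have has' : as' = a.drop (i + 1) := by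
      have ht : (a.drop i).tail = a.drop (i + 1) := by rw [List.tail_drop]
      rw [← ht, ← h]; rfl
    rw [List.foldl_cons]
    have hstep : (0 :: lcsB_row ca b ((List.range' 0 (b.length + 1)).map (lcsD a b i)) 0)
        = (List.range' 0 (b.length + 1)).map (lcsD a b (i + 1)) := by
      have hz : lcsD a b (i + 1) 0 = 0 := by rw [lcsD]
      have hs := lcsB_row_spec a b i b 0 (by simp)
      rw [Nat.sub_zero] at hs
      rw [hz] at hs
      rw [hca, hs]
      rw [List.range'_succ, List.map_cons, hz]
      simp
    rw [hstep]
    exact ih (i + 1) has' (by omega)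

theorem lcsD_take (l1 l2 : List Char) (M N : Nat) :
    ∀ (i j : Nat), i ≤ M → j ≤ N →
      lcsD (l1.take M) (l2.take N) i j = lcsD l1 l2 i j := by
  intro i
  induction i with
  | zero => intro j _ _; rw [lcsD, lcsD]
  | succ i ihi =>
    intro j
    induction j with
    | zero => intro _ _; rw [lcsD, lcsD]
    | succ j ihj =>
      intro hi hj
      have e1 : (l1.take M).getD i ' ' = l1.getD i ' ' := by
        have : i < M := by omega
        simp [List.getD, this]
      have e2 : (l2.take N).getD j ' ' = l2.getD j ' ' := by
        have : j < N := by omega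
        simp [List.getD, this]
      rw [lcsD]; conv_rhs => rw [lcsD]
      rw [e1, e2]
      by_cases hc : l1.getD i ' ' = l2.getD j ' '
      · rw [if_pos hc, if_pos hc, ihi j (by omega) (by omega)]
      · rw [if_neg hc, if_neg hc, ihi (j + 1) (by omega) (by omega),
          ihj (by omega) (by omega)]

-- ===== VERDICT (by name: the statement is the Claim_ definition above) =====
theorem lcsD_zero_left (a b : List Char) (j : Nat) : lcsD a b 0 j = 0 := by rw [lcsD]

theorem row_zero (a b : List Char) :
    (List.range' 0 (b.length + 1)).map (lcsD a b 0) = List.replicate (b.length + 1) (0 : Int) := by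
  refine List.eq_replicate_iff.mpr ⟨by simp, ?_⟩
  intro x hx
  simp only [List.mem_map] at hx
  obtain ⟨j, _, hj⟩ := hx
  rw [← hj, lcsD_zero_left]

theorem getLast?_map_range' (g : Nat → Int) (k : Nat) :
    ((List.range' 0 (k + 1)).map g).getLast? = some (g k) := by
  rw [List.range'_1_concat, List.map_append]
  simp

theorem fold_empty_b (as : List Char) :
    as.foldl (fun prev ca => 0 :: lcsB_row ca ([] : List Char) prev 0) [0] = [0] := by
  induction as with
  | nil => rfl
  | cons ca as' ih => simpa [lcsB_row] using ih

-- ===== VERDICT (by name: the statement is the Claim_ definition above) =====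
theorem lcs_recursive_spec : Claim_equal_lcs_recursive := by
  intro s1 s2 m n _ hpre
  unfold Spec_lcs_recursive lcs_recursive lcs_recursive_alt
  unfold Pre_lcs_recursive at hpre
  dsimp only at hpre ⊢
  set l1 := s1.toList with hl1
  set l2 := s2.toList with hl2
  set m0 := m.getD (l1.length : Int) with hm0d
  set n0 := n.getD (l2.length : Int) with hn0d
  by_cases hm : m0 = 0
  · -- A returns 0; B's a-slice is empty, the initial all-zero row survives
    rw [hm]
    have ha : PySem.List.slice l1 none (some (0 : Int)) = l1.take (0 : Int).toNat :=
      PySem.List.slice_to l1 le_rfl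
    rw [ha]
    simp only [Int.toNat_zero, List.take_zero, List.foldl_nil]
    rw [PySem.List.pyGet?_neg_one]
    have : List.replicate ((PySem.List.slice l2 none (some n0)).length + 1) (0 : Int)
        = List.replicate ((PySem.List.slice l2 none (some n0)).length) (0 : Int) ++ [0] := by
      rw [← List.replicate_succ']
    rw [this, List.getLast?_concat]
    rw [lcsA_go]
    simp
  · by_cases hn : n0 = 0
    · -- A returns 0; B's b-slice is empty, every row is [0]
      rw [hn]
      have hb : PySem.List.slice l2 none (some (0 : Int)) = l2.take (0 : Int).toNat :=
        PySem.List.slice_to l2 le_rfl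
      rw [hb]
      simp only [Int.toNat_zero, List.take_zero, List.length_nil, Nat.zero_add,
        List.replicate_one]
      rw [fold_empty_b, PySem.List.pyGet?_neg_one]
      rw [lcsA_go]
      simp
    · rcases hpre with h | h | h
      · exact absurd h hm
      · exact absurd h hn
      · obtain ⟨hm0, hmle, hn0, hnle⟩ := h
        set M := m0.toNat with hM
        set N := n0.toNat with hN
        have hm0e : m0 = (M : Int) := (Int.toNat_of_nonneg hm0).symm
        have hn0e : n0 = (N : Int) := (Int.toNat_of_nonneg hn0).symm
        have hMle : M ≤ l1.length := by omega
        have hNle : N ≤ l2.length := by omega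
        have ha : PySem.List.slice l1 none (some m0) = l1.take M :=
          PySem.List.slice_to l1 hm0
        have hb : PySem.List.slice l2 none (some n0) = l2.take N :=
          PySem.List.slice_to l2 hn0
        rw [ha, hb]
        set a := l1.take M with hadef
        set b := l2.take N with hbdef
        have hlen_a : a.length = M := by rw [hadef, List.length_take]; omega
        have hA : lcsA_go (M + N + 1) l1 l2 m0 n0 = lcsD l1 l2 M N := by
          rw [hm0e, hn0e]
          exact lcsA_go_eq l1 l2 (M + N + 1) M N hMle hNle (by omega)
        have hfold := lcsB_fold a b a 0 (by simp) (by simp)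
        rw [row_zero] at hfold
        rw [hfold, PySem.List.pyGet?_neg_one, getLast?_map_range']
        rw [hlen_a]
        have hlen_b : b.length = N := by rw [hbdef, List.length_take]; omega
        rw [hlen_b]
        rw [hadef, hbdef, lcsD_take l1 l2 M N M N le_rfl le_rfl]
        rw [hM, hN] at hA ⊢
        rw [hA]
        rfl
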